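-- pv_equiv track=rewrite | github.com/Nguyentheanh1424/Project_I | Code/crack_zip_with_multiple_processes.py.py | _generate_password_chunk
-- ===== SOURCE A (Python) =====
-- def _generate_password_chunk(chars, length, start, chunk_size):
--     """Tạo một đoạn mật khẩu."""
--     base = len(chars)
--     chunk = []
--     for i in range(start, start + chunk_size):
--         password = []
--         idx = i
--         for _ in range(length):
--             password.append(chars[idx % base])
--             idx //= base
--         chunk.append(''.join(reversed(password)))
--     return chunk
-- ===== SOURCE B (Python) =====
-- def _generate_password_chunk(chars, length, start, chunk_size):
--     """Tạo một đoạn mật khẩu."""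
--     if chunk_size <= 0:
--         return []
--     base = len(chars)
--     n = max(length, 0)
--     # odometer: least-significant digit first
--     digits = []
--     idx = start
--     for _ in range(n):
--         digits.append(idx % base)
--         idx //= base
--     chunk = []
--     for _ in range(chunk_size):
--         chunk.append(''.join(chars[d] for d in reversed(digits)))
--         j = 0
--         while j < n:
--             digits[j] = (digits[j] + 1) % base
--             if digits[j]:
--                 break
--             j += 1
--     return chunk
-- ===== Notes on version B (the rewrite author's own statement) =====
-- stated objective: alternative
-- what changed: B replaces per-index base conversion (recomputing all digits of i by repeated %// for every i) with a single odometer: the digit list of start is built once, each next password comes from an in-place increment with carry from the least-significant digit.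
import Mathlib
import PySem

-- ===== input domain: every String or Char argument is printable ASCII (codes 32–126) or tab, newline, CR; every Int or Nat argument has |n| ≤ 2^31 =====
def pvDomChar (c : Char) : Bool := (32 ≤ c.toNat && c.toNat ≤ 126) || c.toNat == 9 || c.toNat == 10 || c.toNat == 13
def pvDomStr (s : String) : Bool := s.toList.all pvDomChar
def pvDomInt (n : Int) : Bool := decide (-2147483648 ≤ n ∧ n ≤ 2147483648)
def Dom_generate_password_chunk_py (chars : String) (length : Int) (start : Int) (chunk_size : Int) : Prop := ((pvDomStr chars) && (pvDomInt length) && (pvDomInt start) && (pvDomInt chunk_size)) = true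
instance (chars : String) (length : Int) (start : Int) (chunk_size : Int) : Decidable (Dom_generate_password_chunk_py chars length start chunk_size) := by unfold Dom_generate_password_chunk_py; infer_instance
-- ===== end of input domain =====

-- B replaces per-index base conversion with a single incrementing odometer over the digit
-- list; same return value on every input where A returns (A raises ZeroDivisionError
-- exactly on empty chars with length > 0 and chunk_size > 0; those inputs are outside Pre_).

-- ===== PORT A =====
def generate_password_chunk_py (chars : String) (length : Int) (start : Int) (chunk_size : Int) : List String :=
  let base : Int := PySem.Str.len chars
  (PySem.List.pyRange start (start + chunk_size) 1).foldl
    (fun chunk i =>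
      let st := (PySem.List.pyRange 0 length 1).foldl
        (fun (st : List Char × Int) _ =>
          (st.1 ++ [(PySem.Str.pyGet? chars (PySem.Int.mod st.2 base)).getD ' '],
           PySem.Int.floordiv st.2 base))
        ([], i)
      chunk ++ [String.ofList st.1.reverse])
    []

-- ===== PORT B =====
-- digits of the odometer, least-significant first (Source B's init loop)
def pvInitDigits (base : Int) : Nat → Int → List Int
  | 0, _ => []
  | n + 1, idx => PySem.Int.mod idx base :: pvInitDigits base n (PySem.Int.floordiv idx base)

-- Source B's while loop: increment with carry from the least-significant digit
def pvInc (base : Int) : List Int → List Int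
  | [] => []
  | d :: rest =>
    let d' := PySem.Int.mod (d + 1) base
    if d' ≠ 0 then d' :: rest else d' :: pvInc base rest

-- emit the current password (''.join over the reversed digit list)
def pvEmit (chars : String) (digits : List Int) : String :=
  String.ofList (digits.reverse.map (fun d => (PySem.Str.pyGet? chars d).getD ' '))

-- Source B's main loop: emit, then increment, chunk_size times
def pvLoop (chars : String) (base : Int) : Nat → List Int → List String
  | 0, _ => []
  | k + 1, digits => pvEmit chars digits :: pvLoop chars base k (pvInc base digits)

def generate_password_chunk_py_alt (chars : String) (length : Int) (start : Int) (chunk_size : Int) : List String :=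
  if chunk_size ≤ 0 then []
  else
    let base : Int := PySem.Str.len chars
    pvLoop chars base chunk_size.toNat (pvInitDigits base length.toNat start)

-- ===== PRECONDITION & SPEC =====
-- Pre_ excludes exactly the inputs on which A raises ZeroDivisionError (idx % 0):
-- empty chars with length > 0 and chunk_size > 0.
def Pre_generate_password_chunk_py (chars : String) (length : Int) (start : Int) (chunk_size : Int) : Prop :=
  chars ≠ "" ∨ length ≤ 0 ∨ chunk_size ≤ 0
instance (chars : String) (length : Int) (start : Int) (chunk_size : Int) : Decidable (Pre_generate_password_chunk_py chars length start chunk_size) := by unfold Pre_generate_password_chunk_py; infer_instance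

def pvWitness_generate_password_chunk_py : String × Int × Int × Int := ("ab", 3, 0, 4)

def Spec_generate_password_chunk_py (chars : String) (length : Int) (start : Int) (chunk_size : Int) (out : List String) : Prop := out = generate_password_chunk_py_alt chars length start chunk_size
instance (chars : String) (length : Int) (start : Int) (chunk_size : Int) (out : List String) : Decidable (Spec_generate_password_chunk_py chars length start chunk_size out) := by unfold Spec_generate_password_chunk_py; infer_instance

-- ===== CLAIM (what is proved, stated in full; the proofs are below) =====
def Claim_equal_generate_password_chunk_py : Prop := ∀ (chars : String) (length : Int) (start : Int) (chunk_size : Int), Dom_generate_password_chunk_py chars length start chunk_size → Pre_generate_password_chunk_py chars length start chunk_size → Spec_generate_password_chunk_py chars length start chunk_size (generate_password_chunk_py chars length start chunk_size)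

-- ===== LEMMAS AND PROOFS =====

-- a foldl whose body ignores the element is an iterate of the state transformer
theorem pv_foldl_ignore {α σ : Type} (g : σ → σ) : ∀ (xs : List α) (s : σ),
    xs.foldl (fun s _ => g s) s = g^[xs.length] s := by
  intro xs
  induction xs with
  | nil => intro s; rfl
  | cons x xs ih => intro s; simp [List.foldl, ih, Function.iterate_succ_apply]

-- A's inner loop accumulates exactly the chars of the LSB-first digit list
theorem pv_inner_iter (chars : String) (base : Int) : ∀ (n : Nat) (acc : List Char) (i : Int),
    (fun (st : List Char × Int) =>
      (st.1 ++ [(PySem.Str.pyGet? chars (PySem.Int.mod st.2 base)).getD ' '],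
       PySem.Int.floordiv st.2 base))^[n] (acc, i)
    = (acc ++ (pvInitDigits base n i).map (fun d => (PySem.Str.pyGet? chars d).getD ' '),
       (fun j => PySem.Int.floordiv j base)^[n] i) := by
  intro n
  induction n with
  | zero => intro acc i; simp [pvInitDigits]
  | succ n ih =>
    intro acc i
    rw [Function.iterate_succ_apply, Function.iterate_succ_apply]
    simp only [ih, pvInitDigits, List.map_cons, List.append_assoc, List.singleton_append]

-- A equals a map of emit ∘ init over the index range, for every input
theorem pv_A_eq_map (chars : String) (length start chunk_size : Int) :
    generate_password_chunk_py chars length start chunk_size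
    = (PySem.List.pyRange start (start + chunk_size) 1).map
        (fun i => pvEmit chars (pvInitDigits (PySem.Str.len chars) length.toNat i)) := by
  unfold generate_password_chunk_py
  rw [PySem.List.foldl_append_singleton_eq_map]
  apply List.map_congr_left
  intro i _
  rw [pv_foldl_ignore, pv_inner_iter]
  have hlen : (PySem.List.pyRange 0 length 1).length = length.toNat := by
    rw [PySem.List.length_pyRange_one]; omega
  rw [hlen]
  simp [pvEmit, List.map_reverse]

-- the odometer increment advances the digit list to the next index (base > 0)
theorem pv_inc_init (base : Int) (hb : 0 < base) : ∀ (n : Nat) (i : Int),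
    pvInc base (pvInitDigits base n i) = pvInitDigits base n (i + 1) := by
  intro n
  induction n with
  | zero => intro i; rfl
  | succ n ih =>
    intro i
    have hbne : base ≠ 0 := by omega
    have h0 : 0 ≤ i % base := Int.emod_nonneg i hbne
    have h1 : i % base < base := Int.emod_lt_of_pos i hb
    have heq : i = base * (i / base) + i % base := by have := Int.ediv_mul_add_emod i base; linarith [this]
    simp only [pvInitDigits, pvInc, PySem.Int.mod_eq_emod_of_pos hb,
      PySem.Int.floordiv_eq_ediv_of_pos hb]
    by_cases hc : i % base + 1 < base
    · -- no carry
      have hm2 : (i % base + 1) % base = i % base + 1 := Int.emod_eq_of_lt (by omega) hc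
      have hmod1 : (i + 1) % base = i % base + 1 := by
        conv_lhs => rw [show i + 1 = i % base + 1 + base * (i / base) by omega]
        rw [Int.add_mul_emod_self_left]
        exact Int.emod_eq_of_lt (by omega) hc
      have hdiv1 : (i + 1) / base = i / base := by
        conv_lhs => rw [show i + 1 = i % base + 1 + base * (i / base) by omega]
        rw [Int.add_mul_ediv_left _ _ hbne, Int.ediv_eq_zero_of_lt (by omega) hc, zero_add]
      rw [hm2, if_pos (by omega), hmod1, hdiv1]
    · -- carry: i % base = base - 1
      have hx : base * (i / base + 1) = base * (i / base) + base := by ring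
      have hm2 : (i % base + 1) % base = 0 := by
        rw [show i % base + 1 = base by omega]
        simp
      have hmod1 : (i + 1) % base = 0 := by
        rw [show i + 1 = base * (i / base + 1) by omega, Int.mul_emod_right]
      have hdiv1 : (i + 1) / base = i / base + 1 := by
        rw [show i + 1 = base * (i / base + 1) by omega, Int.mul_ediv_cancel_left _ hbne]
      rw [hm2, if_neg (by simp), hmod1, hdiv1, ih]

-- B's loop equals the same map, given that the increment steps the init list
theorem pv_loop_eq_map (chars : String) (base : Int) (L : Nat)
    (hstep : ∀ i, pvInc base (pvInitDigits base L i) = pvInitDigits base L (i + 1)) :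
    ∀ (k : Nat) (i : Int),
      pvLoop chars base k (pvInitDigits base L i)
      = (PySem.List.pyRange i (i + k) 1).map (fun x => pvEmit chars (pvInitDigits base L x)) := by
  intro k
  induction k with
  | zero =>
    intro i
    rw [show i + ((0 : Nat) : Int) = i by omega, PySem.List.pyRange_one_eq_nil (le_refl i)]
    rfl
  | succ k ih =>
    intro i
    have hE : i + ((k + 1 : Nat) : Int) = (i + 1) + (k : Nat) := by push_cast; omega
    rw [hE, PySem.List.pyRange_one_cons (by omega : i < i + 1 + (k : Nat))]
    simp only [pvLoop, List.map_cons, hstep, ih]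

-- ===== VERDICT (by name: the statement is the Claim_ definition above) =====
theorem generate_password_chunk_py_spec : Claim_equal_generate_password_chunk_py := by
  intro chars length start chunk_size _ hpre
  unfold Spec_generate_password_chunk_py
  rw [pv_A_eq_map]
  unfold generate_password_chunk_py_alt
  by_cases hcs : chunk_size ≤ 0
  · rw [if_pos hcs, PySem.List.pyRange_one_eq_nil (by omega), List.map_nil]
  · rw [if_neg hcs]
    have hstep : ∀ i, pvInc (PySem.Str.len chars) (pvInitDigits (PySem.Str.len chars) length.toNat i)
        = pvInitDigits (PySem.Str.len chars) length.toNat (i + 1) := by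
      rcases hpre with hne | hL | hcs'
      · have hb : 0 < PySem.Str.len chars := by
          have hnil : chars.toList ≠ [] := by
            intro h
            exact hne (by rw [← String.ofList_toList (s := chars), h])
          have := List.length_pos_iff.mpr hnil
          rw [PySem.Str.len_eq]
          omega
        exact fun i => pv_inc_init _ hb _ i
      · intro i
        rw [show length.toNat = 0 by omega]
        rfl
      · omega
    rw [pv_loop_eq_map chars _ _ hstep chunk_size.toNat start]
    rw [show start + ((chunk_size.toNat : Nat) : Int) = start + chunk_size by omega]
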